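-- pv_equiv track=rewrite | github.com/johnwroge/DSA | Algorithms/string-algorithms/z-algorithm.py | find_all_periods
-- ===== SOURCE A (Python) =====
-- def z_algorithm(s):
--     """
--     Z-Algorithm: Compute Z-array for string s
--
--     Z[i] = length of longest substring starting from s[i]
--            which is also a prefix of s
--
--     Time: O(n), Space: O(n)
--     """
--     n = len(s)
--     if n == 0:
--         return []
--
--     z = [0] * n
--     z[0] = n  # By definition, entire string matches with itself
--
--     left = right = 0  # Window [left, right] of rightmost match
--
--     for i in range(1, n):
--         if i <= right:
--             # We're inside a previous match window
--             # z[i - left] is the Z-value for corresponding position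
--             z[i] = min(right - i + 1, z[i - left])
--
--         # Try to extend the match
--         while i + z[i] < n and s[z[i]] == s[i + z[i]]:
--             z[i] += 1
--
--         # Update the window if we found a match extending further right
--         if i + z[i] - 1 > right:
--             left = i
--             right = i + z[i] - 1
--
--     return z
--
-- def find_all_periods(s):
--     """
--     Find all periods of string using Z-algorithm
--
--     A period p means s[i] == s[i + p] for all valid i
--     """
--     n = len(s)
--     z = z_algorithm(s)
--     periods = []
--
--     # Check each possible period length
--     for p in range(1, n):
--         is_period = True
--
--         # Check if p is a valid period using Z-array
--         for i in range(p, n, p):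
--             if z[i] < min(p, n - i):
--                 is_period = False
--                 break
--
--         if is_period:
--             periods.append(p)
--
--     return periods
-- ===== SOURCE B (Python) =====
-- def find_all_periods(s):
--     n = len(s)
--     return [p for p in range(1, n) if s[p:] == s[:n - p]]
-- ===== Notes on version B (the rewrite author's own statement) =====
-- stated objective: simpler
-- what changed: Replaces the Z-array construction plus the nested scan over multiples of each candidate period by a one-line direct check: p is a period iff s[p:] == s[:n-p].
import Mathlib
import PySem

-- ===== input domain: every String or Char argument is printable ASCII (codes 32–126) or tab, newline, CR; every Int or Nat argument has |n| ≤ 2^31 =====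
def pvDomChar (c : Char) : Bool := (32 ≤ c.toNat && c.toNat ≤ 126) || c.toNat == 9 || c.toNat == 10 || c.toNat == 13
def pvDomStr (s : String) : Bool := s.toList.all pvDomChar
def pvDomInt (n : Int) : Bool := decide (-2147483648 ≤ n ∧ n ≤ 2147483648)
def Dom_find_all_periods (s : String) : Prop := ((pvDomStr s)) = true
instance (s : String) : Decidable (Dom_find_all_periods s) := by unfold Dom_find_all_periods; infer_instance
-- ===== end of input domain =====

-- B replaces A's Z-array construction and nested multiple-scan by the direct check s[p:] == s[:n-p]
-- for each candidate p (simpler; not claimed faster).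

-- ===== PORT A =====
-- the while-loop of z_algorithm: extend z[i] while s[z[i]] == s[i+z[i]].
-- indices are nonnegative and in range here, so `l[k]?` is exactly Python's s[k];
-- fuel bounds the number of iterations (the loop runs at most n steps).
def zExtend (l : List Char) (i : Nat) : Nat → Nat → Nat
  | zi, 0 => zi
  | zi, fuel + 1 =>
    if i + zi < l.length ∧ l[zi]? = l[i + zi]? then zExtend l i (zi + 1) fuel else zi

-- one iteration of the for-loop of z_algorithm; the Python array z is represented by the
-- list of entries set so far (entries beyond it are still 0, which `getD _ 0` reproduces).
def zStep (l : List Char) (st : List Nat × Nat × Nat) (i : Nat) : List Nat × Nat × Nat :=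
  let z := st.1
  let left := st.2.1
  let right := st.2.2
  let z0 := if i ≤ right then min (right - i + 1) (z.getD (i - left) 0) else 0
  let zi := zExtend l i z0 l.length
  if right < i + zi - 1 then (z ++ [zi], i, i + zi - 1) else (z ++ [zi], left, right)

-- z_algorithm(s)
def zAlg (l : List Char) : List Nat :=
  if l.length = 0 then []
  else ((List.range' 1 (l.length - 1)).foldl (zStep l) ([l.length], 0, 0)).1

-- Python's range(p, n, p) is List.range' p ((n-1)/p) p (the multiples p, 2p, … below n),
-- and the inner loop with break over a pure test is `.all`; z[i] is z.getD i 0 (exact, i < n).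
def find_all_periods (s : String) : List Int :=
  let l := s.toList
  let n := l.length
  let z := zAlg l
  ((List.range' 1 (n - 1)).filter (fun p =>
      (List.range' p ((n - 1) / p) p).all (fun i => !(z.getD i 0 < min p (n - i))))).map
    (fun p => (p : Int))

-- ===== PORT B =====
-- s[p:] and s[:n-p] for 0 ≤ p ≤ n are exactly drop p and take (n-p) on the character list.
def find_all_periods_alt (s : String) : List Int :=
  let l := s.toList
  let n := l.length
  ((List.range' 1 (n - 1)).filter (fun p => l.drop p == l.take (n - p))).map (fun p => (p : Int))

-- ===== PRECONDITION & SPEC =====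
def Spec_find_all_periods (s : String) (out : List Int) : Prop := out = find_all_periods_alt s
instance (s : String) (out : List Int) : Decidable (Spec_find_all_periods s out) := by unfold Spec_find_all_periods; infer_instance

-- ===== CLAIM (what is proved, stated in full; the proofs are below) =====
def Claim_equal_find_all_periods : Prop := ∀ (s : String), Dom_find_all_periods s → Spec_find_all_periods s (find_all_periods s)

-- ===== LEMMAS AND PROOFS =====

-- length of the longest common prefix
def lcp : List Char → List Char → Nat
  | a :: as, b :: bs => if a = b then lcp as bs + 1 else 0
  | _, _ => 0

-- the true Z-value: Zv l i = length of the longest common prefix of l and l.drop i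
def Zv (l : List Char) (i : Nat) : Nat := lcp l (l.drop i)

theorem lcp_cons_self (c : Char) (as bs : List Char) : lcp (c :: as) (c :: bs) = lcp as bs + 1 := by
  simp [lcp]

theorem lcp_cons_ne {a b : Char} (as bs : List Char) (h : a ≠ b) : lcp (a :: as) (b :: bs) = 0 := by
  simp [lcp, h]

theorem lcp_le_right : ∀ (a b : List Char), lcp a b ≤ b.length := by
  intro a
  induction a with
  | nil => intro b; cases b <;> simp [lcp]
  | cons x as ih =>
    intro b
    cases b with
    | nil => simp [lcp]
    | cons y bs =>
      by_cases hxy : x = y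
      · subst hxy
        rw [lcp_cons_self]
        have := ih bs
        simp
        omega
      · rw [lcp_cons_ne _ _ hxy]
        simp

theorem lcp_get : ∀ (a b : List Char) (t : Nat), t < lcp a b → a[t]? = b[t]? := by
  intro a
  induction a with
  | nil => intro b t h; cases b <;> simp [lcp] at h
  | cons x as ih =>
    intro b t h
    cases b with
    | nil => simp [lcp] at h
    | cons y bs =>
      by_cases hxy : x = y
      · subst hxy
        rw [lcp_cons_self] at h
        cases t with
        | zero => simp
        | succ t' =>
          simp only [List.getElem?_cons_succ]
          exact ih bs t' (by omega)
      · rw [lcp_cons_ne _ _ hxy] at h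
        omega

theorem lcp_ge : ∀ (a b : List Char) (m : Nat), m ≤ a.length → m ≤ b.length →
    (∀ t, t < m → a[t]? = b[t]?) → m ≤ lcp a b := by
  intro a
  induction a with
  | nil =>
    intro b m h1 _ _
    have : m = 0 := by simpa using h1
    simp [this]
  | cons x as ih =>
    intro b m h1 h2 hp
    cases b with
    | nil =>
      have : m = 0 := by simpa using h2
      simp [this]
    | cons y bs =>
      cases m with
      | zero => exact Nat.zero_le _
      | succ m' =>
        have hxy : x = y := by
          have := hp 0 (Nat.succ_pos _)
          simpa using this
        subst hxy
        rw [lcp_cons_self]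
        have : m' ≤ lcp as bs := by
          apply ih bs m' (by simpa using h1) (by simpa using h2)
          intro t ht
          have := hp (t + 1) (by omega)
          simpa using this
        omega

theorem lcp_mismatch : ∀ (a b : List Char), lcp a b < a.length → lcp a b < b.length →
    a[lcp a b]? ≠ b[lcp a b]? := by
  intro a
  induction a with
  | nil => intro b h1 _; simp at h1
  | cons x as ih =>
    intro b h1 h2
    cases b with
    | nil => simp at h2
    | cons y bs =>
      by_cases hxy : x = y
      · subst hxy
        rw [lcp_cons_self] at h1 h2 ⊢
        simp only [List.getElem?_cons_succ]
        exact ih bs (by simpa using h1) (by simpa using h2)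
      · rw [lcp_cons_ne _ _ hxy]
        simpa using hxy

theorem lcp_self : ∀ (a : List Char), lcp a a = a.length := by
  intro a
  induction a with
  | nil => simp [lcp]
  | cons x as ih => rw [lcp_cons_self, ih]; simp

theorem Zv_le (l : List Char) (i : Nat) : Zv l i ≤ l.length - i := by
  have := lcp_le_right l (l.drop i)
  simpa [Zv] using this

theorem Zv_get (l : List Char) (i t : Nat) (h : t < Zv l i) : l[t]? = l[i + t]? := by
  have := lcp_get l (l.drop i) t h
  rwa [List.getElem?_drop] at this

theorem Zv_ge (l : List Char) (i m : Nat) (h : i + m ≤ l.length)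
    (hp : ∀ t, t < m → l[t]? = l[i + t]?) : m ≤ Zv l i := by
  apply lcp_ge
  · omega
  · simp
    omega
  · intro t ht
    rw [List.getElem?_drop]
    exact hp t ht

theorem Zv_zero (l : List Char) : Zv l 0 = l.length := by
  simp [Zv, lcp_self]

-- the while loop computes exactly the true Z-value, given a correct partial match to start from
theorem zExtend_eq (l : List Char) (i : Nat) : ∀ (fuel zi : Nat), zi ≤ Zv l i →
    Zv l i - zi ≤ fuel → zExtend l i zi fuel = Zv l i := by
  intro fuel
  induction fuel with
  | zero =>
    intro zi h1 h2
    simp only [zExtend]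
    omega
  | succ f ih =>
    intro zi h1 h2
    rcases Nat.lt_or_ge zi (Zv l i) with hlt | hge
    · have hle : Zv l i ≤ l.length - i := Zv_le l i
      have hin : i + zi < l.length := by omega
      have hch : l[zi]? = l[i + zi]? := Zv_get l i zi hlt
      rw [zExtend, if_pos ⟨hin, hch⟩]
      exact ih (zi + 1) (by omega) (by omega)
    · have heq : zi = Zv l i := by omega
      subst heq
      rw [zExtend, if_neg]
      rintro ⟨hin, hch⟩
      have h1' : Zv l i < l.length := by omega
      have h2' : Zv l i < (l.drop i).length := by simp; omega
      have hne := lcp_mismatch l (l.drop i) h1' h2'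
      rw [List.getElem?_drop] at hne
      exact hne hch

-- invariant of the main for-loop after processing i = 1, …, m
def ZInv (l : List Char) (m : Nat) (st : List Nat × Nat × Nat) : Prop :=
  st.1 = (List.range (m + 1)).map (Zv l) ∧ st.2.1 ≤ m ∧ st.2.2 < l.length ∧
    st.2.1 ≤ st.2.2 + 1 ∧ st.2.2 + 1 - st.2.1 ≤ Zv l st.2.1 ∧ (st.2.1 = 0 → st.2.2 = 0)

theorem getD_map_range_Zv (l : List Char) (k j : Nat) (h : j < k) :
    (((List.range k).map (Zv l)).getD j 0) = Zv l j := by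
  rw [List.getD_eq_getElem?_getD]
  simp [h]

theorem zStep_inv (l : List Char) (m : Nat) (st : List Nat × Nat × Nat)
    (hinv : ZInv l m st) (hm : m + 1 < l.length) : ZInv l (m + 1) (zStep l st (m + 1)) := by
  obtain ⟨z, left, right⟩ := st
  unfold ZInv at hinv ⊢
  obtain ⟨hz, hlm, hrn, hlr, hwin, hlz⟩ := hinv
  replace hz : z = (List.range (m + 1)).map (Zv l) := hz
  replace hlm : left ≤ m := hlm
  replace hrn : right < l.length := hrn
  replace hlr : left ≤ right + 1 := hlr
  replace hwin : right + 1 - left ≤ Zv l left := hwin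
  replace hlz : left = 0 → right = 0 := hlz
  have hZle : Zv l (m + 1) ≤ l.length - (m + 1) := Zv_le l (m + 1)
  have hz0 : (if m + 1 ≤ right then min (right - (m + 1) + 1) (z.getD (m + 1 - left) 0) else 0)
      ≤ Zv l (m + 1) := by
    split
    · rename_i hir
      have hl1 : 1 ≤ left := by
        rcases Nat.eq_zero_or_pos left with h0 | h1
        · have := hlz h0; omega
        · exact h1
      have hil : m + 1 - left < m + 1 := by omega
      rw [hz, getD_map_range_Zv l (m + 1) (m + 1 - left) hil]
      apply Zv_ge
      · have := Nat.min_le_left (right - (m + 1) + 1) (Zv l (m + 1 - left))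
        omega
      · intro t ht
        have ht1 : t < Zv l (m + 1 - left) :=
          lt_of_lt_of_le ht (Nat.min_le_right _ _)
        have ht2 : t < right - (m + 1) + 1 :=
          lt_of_lt_of_le ht (Nat.min_le_left _ _)
        have e1 : l[t]? = l[(m + 1 - left) + t]? := Zv_get l (m + 1 - left) t ht1
        have e2 : l[(m + 1 - left) + t]? = l[left + ((m + 1 - left) + t)]? := by
          apply Zv_get l left
          omega
        rw [e1, e2]
        congr 1
        omega
    · exact Nat.zero_le _
  have hzi : zExtend l (m + 1)
      (if m + 1 ≤ right then min (right - (m + 1) + 1) (z.getD (m + 1 - left) 0) else 0)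
      l.length = Zv l (m + 1) :=
    zExtend_eq l (m + 1) l.length _ hz0 (by omega)
  have hstep : zStep l (z, left, right) (m + 1) =
      if right < m + 1 + Zv l (m + 1) - 1 then
        (z ++ [Zv l (m + 1)], m + 1, m + 1 + Zv l (m + 1) - 1)
      else (z ++ [Zv l (m + 1)], left, right) := by
    unfold zStep
    simp only
    rw [hzi]
  have hznew : z ++ [Zv l (m + 1)] = (List.range (m + 1 + 1)).map (Zv l) := by
    conv_rhs => rw [List.range_succ]
    rw [List.map_append, hz]
    rfl
  rw [hstep]
  split
  · rename_i hupd
    exact ⟨hznew, Nat.le_refl (m + 1),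
      show m + 1 + Zv l (m + 1) - 1 < l.length by omega,
      show m + 1 ≤ m + 1 + Zv l (m + 1) - 1 + 1 by omega,
      show m + 1 + Zv l (m + 1) - 1 + 1 - (m + 1) ≤ Zv l (m + 1) by omega,
      fun h => absurd (show m + 1 = 0 from h) (by omega)⟩
  · exact ⟨hznew, show left ≤ m + 1 by omega, hrn, hlr, hwin, hlz⟩

theorem zAlg_foldl (l : List Char) : ∀ (m : Nat), m < l.length →
    ZInv l m ((List.range' 1 m).foldl (zStep l) ([l.length], 0, 0)) := by
  intro m
  induction m with
  | zero =>
    intro hm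
    rw [show List.range' 1 0 = ([] : List Nat) from rfl, List.foldl_nil]
    exact ⟨by simp [List.range_one, Zv_zero], Nat.le_refl 0,
      show (0 : Nat) < l.length from hm, show (0 : Nat) ≤ 0 + 1 by omega,
      show 0 + 1 - 0 ≤ Zv l 0 by rw [Zv_zero]; omega, fun _ => rfl⟩
  | succ m' ih =>
    intro hm
    rw [List.range'_concat, List.foldl_append, List.foldl_cons, List.foldl_nil,
      show 1 + 1 * m' = m' + 1 from by omega]
    exact zStep_inv l m' _ (ih (by omega)) hm

theorem zAlg_getD (l : List Char) (i : Nat) (h : i < l.length) :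
    (zAlg l).getD i 0 = Zv l i := by
  unfold zAlg
  rw [if_neg (by omega)]
  obtain ⟨hz, -⟩ := zAlg_foldl l (l.length - 1) (by omega)
  rw [hz, show l.length - 1 + 1 = l.length from by omega]
  exact getD_map_range_Zv l l.length i h

-- the per-candidate equivalence: the scan over multiples of p succeeds iff s[p:] == s[:n-p]
theorem period_iff (l : List Char) (p : Nat) (hp1 : 1 ≤ p) (hpn : p < l.length) :
    ((∀ j, 1 ≤ j → j * p < l.length → min p (l.length - j * p) ≤ Zv l (j * p)) ↔
      l.drop p = l.take (l.length - p)) := by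
  constructor
  · intro H
    have hpoint : ∀ j, j < l.length - p → l[p + j]? = l[j]? := by
      intro j hj
      obtain ⟨q, r, hrp, hqr⟩ : ∃ q r, r < p ∧ p * q + r = j :=
        ⟨j / p, j % p, Nat.mod_lt _ (by omega), Nat.div_add_mod j p⟩
      have e1 : (q + 1) * p = p * q + p := by ring
      have e2 : q * p = p * q := Nat.mul_comm q p
      have ha : l[r]? = l[(q + 1) * p + r]? := by
        have hlt : (q + 1) * p < l.length := by omega
        have hmin := H (q + 1) (by omega) hlt
        have hrm : r < min p (l.length - (q + 1) * p) := lt_min hrp (by omega)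
        exact Zv_get l ((q + 1) * p) r (lt_of_lt_of_le hrm hmin)
      have hb : l[j]? = l[r]? := by
        rcases Nat.eq_zero_or_pos q with hq0 | hq0
        · rw [hq0] at hqr
          simp at hqr
          rw [← hqr]
        · have hlt : q * p < l.length := by omega
          have hmin := H q (by omega) hlt
          have hrm : r < min p (l.length - q * p) := lt_min hrp (by omega)
          have hg := Zv_get l (q * p) r (lt_of_lt_of_le hrm hmin)
          rw [hg]
          congr 1
          omega
      rw [hb, ha]
      congr 1
      omega
    apply List.ext_getElem?
    intro j
    rw [List.getElem?_drop]
    rcases Nat.lt_or_ge j (l.length - p) with hj | hj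
    · rw [List.getElem?_take_of_lt hj]
      exact hpoint j hj
    · rw [List.getElem?_eq_none (by omega), List.getElem?_eq_none (by simp; omega)]
  · intro H
    have hpoint : ∀ j, j < l.length - p → l[p + j]? = l[j]? := by
      intro j hj
      have := congrArg (fun t => t[j]?) H
      simp only [List.getElem?_drop] at this
      rw [this, List.getElem?_take_of_lt hj]
    -- every position agrees with its residue modulo p
    have hmod : ∀ j, j < l.length → l[j]? = l[j % p]? := by
      intro j
      induction j using Nat.strong_induction_on with
      | _ j ih =>
        intro hjn
        rcases Nat.lt_or_ge j p with hjp | hjp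
        · rw [Nat.mod_eq_of_lt hjp]
        · have hje : j = p + (j - p) := by omega
          have h1 : l[j]? = l[j - p]? := by
            have := hpoint (j - p) (by omega)
            rwa [← hje] at this
          rw [h1, ih (j - p) (by omega) (by omega)]
          congr 1
          conv_rhs => rw [hje]
          rw [Nat.add_mod_left]
    intro j hj1 hjn
    apply Zv_ge
    · have := Nat.min_le_right p (l.length - j * p)
      omega
    · intro t ht
      have htp : t < p := lt_of_lt_of_le ht (Nat.min_le_left _ _)
      have h1 : l[j * p + t]? = l[(j * p + t) % p]? := hmod (j * p + t) (by
        have := Nat.min_le_right p (l.length - j * p)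
        omega)
      have h2 : (j * p + t) % p = t := by
        rw [Nat.mul_comm, Nat.mul_add_mod]
        exact Nat.mod_eq_of_lt htp
      rw [h1, h2]

-- ===== VERDICT (by name: the statement is the Claim_ definition above) =====
theorem find_all_periods_spec : Claim_equal_find_all_periods := by
  intro s _
  show find_all_periods s = find_all_periods_alt s
  unfold find_all_periods find_all_periods_alt
  simp only
  have hfeq : List.filter (fun p =>
        (List.range' p ((s.toList.length - 1) / p) p).all fun i =>
          !decide ((zAlg s.toList).getD i 0 < min p (s.toList.length - i)))
      (List.range' 1 (s.toList.length - 1)) =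
      List.filter (fun p => s.toList.drop p == s.toList.take (s.toList.length - p))
      (List.range' 1 (s.toList.length - 1)) := by
    apply List.filter_congr
    intro p hp
    rw [List.mem_range'] at hp
    obtain ⟨k, hk, hpk⟩ := hp
    have hp1 : 1 ≤ p := by omega
    have hpn : p < s.toList.length := by omega
    rw [Bool.eq_iff_iff, List.all_eq_true, beq_iff_eq, ← period_iff s.toList p hp1 hpn]
    constructor
    · intro H j hj1 hjn
      have hle : j * p ≤ s.toList.length - 1 := by omega
      have hmem : j * p ∈ List.range' p ((s.toList.length - 1) / p) p := by
        rw [List.mem_range']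
        refine ⟨j - 1, by
          have := (Nat.le_div_iff_mul_le hp1).mpr hle
          omega, ?_⟩
        have hj' : j - 1 + 1 = j := by omega
        calc j * p = p * (j - 1 + 1) := by rw [hj']; exact Nat.mul_comm j p
          _ = p + p * (j - 1) := by ring
      have hall := H (j * p) hmem
      simp only [Bool.not_eq_true', decide_eq_false_iff_not, Nat.not_lt] at hall
      rwa [zAlg_getD s.toList (j * p) hjn] at hall
    · intro H i hi
      rw [List.mem_range'] at hi
      obtain ⟨k', hk', hik⟩ := hi
      have he : i = (k' + 1) * p := by rw [hik]; ring
      have hkle : (k' + 1) * p ≤ s.toList.length - 1 :=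
        (Nat.le_div_iff_mul_le hp1).mp (by omega)
      have hin : i < s.toList.length := by omega
      have hmin := H (k' + 1) (by omega) (by omega)
      simp only [Bool.not_eq_true', decide_eq_false_iff_not, Nat.not_lt]
      rw [zAlg_getD s.toList i hin, he]
      exact hmin
  rw [hfeq]
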